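-- pv_equiv track=rewrite | github.com/sanjayts/codewars-py | kyu4/edge_detection.py | _running_total_pairs
-- ===== SOURCE A (Python) =====
-- def _running_total_pairs(pairs):
--     new_pairs = []
--     for (i, (px, cnt)) in enumerate(pairs):
--         if i == 0:
--             new_pairs.append((px, cnt - 1))
--         else:
--             pair = (px, cnt + new_pairs[i - 1][1])
--             new_pairs.append(pair)
--     return new_pairs
-- ===== SOURCE B (Python) =====
-- def _running_total_pairs(pairs):
--     totals = []
--     t = 0
--     for _, cnt in pairs:
--         t += cnt
--         totals.append(t)
--     return [(px, t - 1) for (px, _), t in zip(pairs, totals)]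
-- ===== Notes on version B (the rewrite author's own statement) =====
-- stated objective: idiomatic
-- what changed: B first builds the prefix-sum table of the second coordinates in one pass, then shapes the output with zip, subtracting 1 from every total; A instead builds the output in a single indexed loop that reads back the last appended pair and special-cases index 0.
import Mathlib
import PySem

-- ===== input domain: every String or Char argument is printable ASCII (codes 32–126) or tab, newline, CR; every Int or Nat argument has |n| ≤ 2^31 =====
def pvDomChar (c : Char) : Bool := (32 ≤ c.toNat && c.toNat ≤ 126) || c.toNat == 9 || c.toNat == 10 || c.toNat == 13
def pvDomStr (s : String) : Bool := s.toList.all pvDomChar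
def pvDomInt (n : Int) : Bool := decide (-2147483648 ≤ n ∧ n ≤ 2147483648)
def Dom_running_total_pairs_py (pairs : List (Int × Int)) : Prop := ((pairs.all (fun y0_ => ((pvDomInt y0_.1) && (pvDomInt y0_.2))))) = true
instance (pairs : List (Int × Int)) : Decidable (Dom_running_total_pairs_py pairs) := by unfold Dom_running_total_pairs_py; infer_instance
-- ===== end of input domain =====

-- B replaces A's indexed loop (which reads back the last appended pair and
-- special-cases index 0) by a prefix-sum table plus a zip; return values are equal.

-- ===== PORT A =====
-- the 'for (i, (px, cnt)) in enumerate(pairs)' loop; 'new_pairs[i-1]' is always in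
-- range (i ≥ 1 and len(new_pairs) = i there), so the pyGetD default is never used
def running_total_pairs_py (pairs : List (Int × Int)) : List (Int × Int) :=
  (PySem.List.enumerate pairs 0).foldl
    (fun new_pairs x =>
      if x.1 = 0 then
        new_pairs ++ [(x.2.1, x.2.2 - 1)]
      else
        new_pairs ++ [(x.2.1, x.2.2 + (PySem.List.pyGetD new_pairs (x.1 - 1) (0, 0)).2)])
    []

-- ===== PORT B =====
-- the 'for _, cnt in pairs: t += cnt; totals.append(t)' pass
def pyPrefixTotals (t : Int) : List (Int × Int) → List Int
  | [] => []
  | (_, c) :: r => (t + c) :: pyPrefixTotals (t + c) r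

def running_total_pairs_py_alt (pairs : List (Int × Int)) : List (Int × Int) :=
  List.zipWith (fun p t => (p.1, t - 1)) pairs (pyPrefixTotals 0 pairs)

-- ===== PRECONDITION & SPEC =====
def Spec_running_total_pairs_py (pairs : List (Int × Int)) (out : List (Int × Int)) : Prop := out = running_total_pairs_py_alt pairs
instance (pairs : List (Int × Int)) (out : List (Int × Int)) : Decidable (Spec_running_total_pairs_py pairs out) := by unfold Spec_running_total_pairs_py; infer_instance

-- ===== CLAIM (what is proved, stated in full; the proofs are below) =====
def Claim_equal_running_total_pairs_py : Prop := ∀ (pairs : List (Int × Int)), Dom_running_total_pairs_py pairs → Spec_running_total_pairs_py pairs (running_total_pairs_py pairs)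

-- ===== LEMMAS AND PROOFS =====

-- reference function: output pairs whose second components run s + c₁, s + c₁ + c₂, …
def rtGo (s : Int) : List (Int × Int) → List (Int × Int)
  | [] => []
  | (p, c) :: r => (p, s + c) :: rtGo (s + c) r

theorem rtGo_eq_zip (r : List (Int × Int)) : ∀ t : Int,
    List.zipWith (fun p v => (p.1, v - 1)) r (pyPrefixTotals t r) = rtGo (t - 1) r := by
  induction r with
  | nil => intro t; rfl
  | cons hd tl ih =>
      intro t
      obtain ⟨p, c⟩ := hd
      simp only [pyPrefixTotals, rtGo, List.zipWith, ih (t + c)]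
      rw [show t + c - 1 = t - 1 + c from by omega]

theorem rtGo_loop (rest : List (Int × Int)) : ∀ (pre : List (Int × Int)) (q t : Int),
    (PySem.List.enumerate rest ((pre.length : Int) + 1)).foldl
      (fun new_pairs x =>
        if x.1 = 0 then
          new_pairs ++ [(x.2.1, x.2.2 - 1)]
        else
          new_pairs ++ [(x.2.1, x.2.2 + (PySem.List.pyGetD new_pairs (x.1 - 1) (0, 0)).2)])
      (pre ++ [(q, t)]) = pre ++ [(q, t)] ++ rtGo t rest := by
  induction rest with
  | nil => intro pre q t; simp [PySem.List.enumerate_nil, rtGo]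
  | cons hd tl ih =>
      intro pre q t
      obtain ⟨p, c⟩ := hd
      rw [PySem.List.enumerate_cons]
      simp only [List.foldl_cons]
      have hne : ((pre.length : Int) + 1) ≠ 0 := by omega
      rw [if_neg hne]
      have hidx : (pre.length : Int) + 1 - 1 = (pre.length : Int) := by omega
      have hget : PySem.List.pyGetD (pre ++ [(q, t)]) ((pre.length : Int) + 1 - 1) ((0 : Int), (0 : Int)) = (q, t) := by
        rw [hidx, PySem.List.pyGetD_natCast]
        simp [List.getD]
      rw [hget]
      have harr : pre ++ [(q, t)] ++ [(p, c + t)] = (pre ++ [(q, t)]) ++ [(p, c + t)] := by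
        simp
      have hlen : (pre.length : Int) + 1 + 1 = (((pre ++ [(q, t)]).length : Int) + 1) := by
        simp
      rw [harr, hlen, ih (pre ++ [(q, t)]) p (c + t)]
      simp only [rtGo]
      rw [show t + c = c + t from by omega]
      simp

-- ===== VERDICT (by name: the statement is the Claim_ definition above) =====
theorem running_total_pairs_py_spec : Claim_equal_running_total_pairs_py := by
  intro pairs _
  unfold Spec_running_total_pairs_py running_total_pairs_py running_total_pairs_py_alt
  cases pairs with
  | nil => rfl
  | cons hd tl =>
      obtain ⟨p, c⟩ := hd
      rw [PySem.List.enumerate_cons]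
      simp only [List.foldl_cons, reduceIte, List.nil_append]
      have hl := rtGo_loop tl [] p (c - 1)
      simp only [List.length_nil, Nat.cast_zero, zero_add, List.nil_append] at hl
      simp only [zero_add]
      rw [hl]
      simp only [pyPrefixTotals, List.zipWith]
      rw [rtGo_eq_zip tl (0 + c)]
      rw [show (0 : Int) + c - 1 = c - 1 from by omega]
      simp
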